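-- pv_equiv track=rewrite | github.com/chesterzcl/Oyster-Genome-study | scripts/python/Synteny_characterization.py | layout_chromosomes
-- ===== SOURCE A (Python) =====
-- def layout_chromosomes(chrom_lengths, x):
--     y_offset = 0
--     layout = {}
--     spacing = 1000000  # 1Mb between bars
--     for chrom, size in sorted(chrom_lengths.items()):
--         layout[chrom] = (x, y_offset, y_offset + size)
--         y_offset += size + spacing
--     return layout
-- ===== SOURCE B (Python) =====
-- def layout_chromosomes(chrom_lengths, x):
--     spacing = 1000000  # 1Mb between bars
--     items = sorted(chrom_lengths.items())
--     starts = [0]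
--     for _, size in items:
--         starts.append(starts[-1] + size + spacing)
--     return {chrom: (x, y0, y0 + size) for (chrom, size), y0 in zip(items, starts)}
-- ===== Notes on version B (the rewrite author's own statement) =====
-- stated objective: idiomatic
-- what changed: Replaces the threaded y_offset accumulator with a separately built prefix-start table zipped against the sorted items in a dict comprehension.
import Mathlib
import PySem

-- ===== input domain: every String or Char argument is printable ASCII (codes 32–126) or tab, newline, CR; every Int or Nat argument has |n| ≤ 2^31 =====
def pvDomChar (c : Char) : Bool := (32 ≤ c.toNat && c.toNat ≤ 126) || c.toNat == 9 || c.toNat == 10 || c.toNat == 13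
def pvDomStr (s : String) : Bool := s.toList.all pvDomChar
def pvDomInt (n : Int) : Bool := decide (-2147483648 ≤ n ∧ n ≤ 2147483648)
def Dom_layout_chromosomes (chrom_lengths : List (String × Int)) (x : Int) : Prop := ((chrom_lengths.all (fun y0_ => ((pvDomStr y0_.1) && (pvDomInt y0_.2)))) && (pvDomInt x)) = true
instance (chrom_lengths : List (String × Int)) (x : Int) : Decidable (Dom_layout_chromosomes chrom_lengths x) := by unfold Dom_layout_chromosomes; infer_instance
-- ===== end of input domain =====

-- B replaces A's threaded y_offset accumulator with a separately built prefix-start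
-- table zipped against the sorted items (a more idiomatic two-pass decomposition).

-- ===== PORT A =====
def layout_chromosomes (chrom_lengths : List (String × Int)) (x : Int) : List (String × Int × Int × Int) :=
  let spacing : Int := 1000000
  (((PySem.List.sorted2 chrom_lengths (fun p => p.1) (fun p => p.2)).foldl
      (fun (st : Int × PySem.Dict String (Int × Int × Int)) p =>
        (st.1 + (p.2 + spacing), st.2.insert p.1 (x, st.1, st.1 + p.2)))
      (0, PySem.Dict.empty)).2).items

-- ===== PORT B =====
def layout_chromosomes_alt (chrom_lengths : List (String × Int)) (x : Int) : List (String × Int × Int × Int) :=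
  let spacing : Int := 1000000
  let items := PySem.List.sorted2 chrom_lengths (fun p => p.1) (fun p => p.2)
  let starts := items.foldl
      (fun (acc : List Int) p => acc ++ [PySem.List.pyGetD acc (-1) 0 + p.2 + spacing]) [0]
  ((items.zip starts).foldl
      (fun (d : PySem.Dict String (Int × Int × Int)) q =>
        d.insert q.1.1 (x, q.2, q.2 + q.1.2)) PySem.Dict.empty).items

-- ===== PRECONDITION & SPEC =====
def Spec_layout_chromosomes (chrom_lengths : List (String × Int)) (x : Int) (out : List (String × Int × Int × Int)) : Prop := out = layout_chromosomes_alt chrom_lengths x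
instance (chrom_lengths : List (String × Int)) (x : Int) (out : List (String × Int × Int × Int)) : Decidable (Spec_layout_chromosomes chrom_lengths x out) := by unfold Spec_layout_chromosomes; infer_instance

-- ===== CLAIM (what is proved, stated in full; the proofs are below) =====
def Claim_equal_layout_chromosomes : Prop := ∀ (chrom_lengths : List (String × Int)) (x : Int), Dom_layout_chromosomes chrom_lengths x → Spec_layout_chromosomes chrom_lengths x (layout_chromosomes chrom_lengths x)

-- ===== LEMMAS AND PROOFS =====

-- the prefix-start table B builds, written as a structural recursion
def pvScanStarts : List (String × Int) → Int → List Int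
  | [], y => [y]
  | p :: t, y => y :: pvScanStarts t (y + p.2 + 1000000)

theorem pvStarts_eq (l : List (String × Int)) : ∀ (pre : List Int) (y : Int),
    l.foldl (fun (acc : List Int) p => acc ++ [PySem.List.pyGetD acc (-1) 0 + p.2 + 1000000]) (pre ++ [y])
      = pre ++ pvScanStarts l y := by
  induction l with
  | nil => intro pre y; simp [pvScanStarts]
  | cons p t ih =>
      intro pre y
      have hg : PySem.List.pyGetD (pre ++ [y]) (-1) 0 = y := by
        simp [PySem.List.pyGetD, PySem.List.pyGet?_neg_one_append_singleton]
      simp only [List.foldl_cons, hg, pvScanStarts]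
      have := ih (pre ++ [y]) (y + p.2 + 1000000)
      simpa using this

theorem pvFold_eq (l : List (String × Int)) (x : Int) :
    ∀ (y : Int) (d : PySem.Dict String (Int × Int × Int)),
    (l.foldl (fun (st : Int × PySem.Dict String (Int × Int × Int)) p =>
        (st.1 + (p.2 + 1000000), st.2.insert p.1 (x, st.1, st.1 + p.2))) (y, d)).2
      = (l.zip (pvScanStarts l y)).foldl
          (fun (d : PySem.Dict String (Int × Int × Int)) q =>
            d.insert q.1.1 (x, q.2, q.2 + q.1.2)) d := by
  induction l with
  | nil => intro y d; rfl
  | cons p t ih =>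
      intro y d
      simp only [List.foldl_cons, pvScanStarts, List.zip_cons_cons]
      have h : y + (p.2 + 1000000) = y + p.2 + 1000000 := by ring
      rw [h]
      exact ih (y + p.2 + 1000000) (d.insert p.1 (x, y, y + p.2))

-- ===== VERDICT (by name: the statement is the Claim_ definition above) =====
theorem layout_chromosomes_spec : Claim_equal_layout_chromosomes := by
  intro cl x _
  unfold Spec_layout_chromosomes layout_chromosomes layout_chromosomes_alt
  simp only
  rw [pvFold_eq]
  have := pvStarts_eq (PySem.List.sorted2 cl (fun p => p.1) (fun p => p.2)) [] 0
  simp only [List.nil_append] at this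
  rw [this]
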